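-- pv_equiv track=rewrite | github.com/MatteoBrog/IstruttorieAI | app/Demo_App.py | _page_of_match
-- ===== SOURCE A (Python) =====
-- def _page_of_match(text_ff: str, match_start: int) -> int:
--     """Calcola pagina (1-based) dato l'indice di inizio match su testo con form feed."""
--     pages = text_ff.split("\f")
--     off = 0
--     for i, p in enumerate(pages, start=1):
--         nxt = off + len(p)
--         if match_start <= nxt:
--             return i
--         off = nxt + 1
--     return max(1, len(pages))
-- ===== SOURCE B (Python) =====
-- def _page_of_match(text_ff: str, match_start: int) -> int:
--     """Page = 1 + number of form feeds strictly before the (clamped) offset."""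
--     return 1 + text_ff.count("\f", 0, max(0, match_start))
-- ===== Notes on version B (the rewrite author's own statement) =====
-- stated objective: simpler
-- what changed: Replaced the split-on-form-feed list construction and offset-accumulating scan by a direct one-liner: the 1-based page is 1 plus the count of form-feed characters in the prefix before the clamped match offset.
import Mathlib
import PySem

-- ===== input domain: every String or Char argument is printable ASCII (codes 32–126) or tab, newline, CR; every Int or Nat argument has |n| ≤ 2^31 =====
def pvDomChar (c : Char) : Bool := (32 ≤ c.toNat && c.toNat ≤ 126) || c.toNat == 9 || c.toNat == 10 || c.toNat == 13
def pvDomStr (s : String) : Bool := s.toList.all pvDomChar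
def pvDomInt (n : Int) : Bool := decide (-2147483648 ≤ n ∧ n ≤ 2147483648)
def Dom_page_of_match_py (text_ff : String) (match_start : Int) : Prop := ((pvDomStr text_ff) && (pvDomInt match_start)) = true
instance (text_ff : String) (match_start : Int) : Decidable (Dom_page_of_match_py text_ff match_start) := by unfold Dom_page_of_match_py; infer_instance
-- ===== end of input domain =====

-- B replaces A's split-and-scan over pages by counting the form feeds before the (clamped) offset; objective: simpler.

-- ===== PORT A =====
-- the 'for i, p in enumerate(pages, start=1)' loop with early return; carries i, off and the
-- fall-through value max(1, len(pages)) (computed from the unchanged pages list, as in Python).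
def pageLoopA : List (List Char) → Int → Int → Int → Int → Int
  | [], _, _, _, fb => fb
  | p :: rest, ms, i, off, fb =>
      let nxt := off + (p.length : Int)
      if ms ≤ nxt then i else pageLoopA rest ms (i + 1) (nxt + 1) fb

def page_of_match_py (text_ff : String) (match_start : Int) : Int :=
  let pages := PySem.Chars.splitOn text_ff.toList ['\x0c']
  pageLoopA pages match_start 1 0 (max 1 (pages.length : Int))

-- ===== PORT B =====
-- text_ff.count("\f", 0, max(0, match_start)): counting a 1-character needle in s[0:end]
-- is exactly the count of that character in the first max(0, end) characters.
def page_of_match_py_alt (text_ff : String) (match_start : Int) : Int :=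
  1 + ((text_ff.toList.take (max 0 match_start).toNat).count '\x0c' : Int)

-- ===== PRECONDITION & SPEC =====
def Spec_page_of_match_py (text_ff : String) (match_start : Int) (out : Int) : Prop := out = page_of_match_py_alt text_ff match_start
instance (text_ff : String) (match_start : Int) (out : Int) : Decidable (Spec_page_of_match_py text_ff match_start out) := by unfold Spec_page_of_match_py; infer_instance

-- ===== CLAIM (what is proved, stated in full; the proofs are below) =====
def Claim_equal_page_of_match_py : Prop := ∀ (text_ff : String) (match_start : Int), Dom_page_of_match_py text_ff match_start → Spec_page_of_match_py text_ff match_start (page_of_match_py text_ff match_start)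

-- ===== LEMMAS AND PROOFS =====

-- Proof-side recursive characterisation of splitting on a single '\x0c'.
def pvSplitFF : List Char → List (List Char)
  | [] => [[]]
  | c :: r => if c = '\x0c' then [] :: pvSplitFF r
              else (c :: (pvSplitFF r).headI) :: (pvSplitFF r).tail

theorem pvSplitFF_ne_nil (cs : List Char) : pvSplitFF cs ≠ [] := by
  cases cs with
  | nil => simp [pvSplitFF]
  | cons c r => simp only [pvSplitFF]; split <;> simp

theorem splitOn_go_eq (fuel : Nat) : ∀ (l cur : List Char) (acc : List (List Char)),
    l.length < fuel →
    PySem.Chars.splitOn.go ['\x0c'] fuel l cur acc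
      = acc.reverse ++ (pvSplitFF l).modifyHead (cur.reverse ++ ·) := by
  induction fuel with
  | zero => intro l cur acc h; omega
  | succ fuel ih =>
    intro l cur acc h
    cases l with
    | nil =>
      rw [PySem.Chars.splitOn.go.eq_def]
      simp [pvSplitFF]
    | cons c rest =>
      rw [PySem.Chars.splitOn.go.eq_def]
      by_cases hc : c = '\x0c'
      · subst hc
        have hpre : (['\x0c'] : List Char).isPrefixOf ('\x0c' :: rest) = true := by
          simp [List.isPrefixOf]
        simp only [hpre, if_true]
        rw [ih _ _ _ (by simpa using Nat.lt_of_succ_lt_succ h)]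
        simp [pvSplitFF, List.modifyHead]
        cases hfr : pvSplitFF rest with
        | nil => exact absurd hfr (pvSplitFF_ne_nil rest)
        | cons hh tt => simp
      · have hpre : (['\x0c'] : List Char).isPrefixOf (c :: rest) = false := by
          simp [List.isPrefixOf]
          exact fun hx => absurd hx.symm hc
        simp only [hpre]
        simp only [Bool.false_eq_true, if_false]
        rw [ih _ _ _ (Nat.lt_of_succ_lt_succ h)]
        have hne := pvSplitFF_ne_nil rest
        cases hfr : pvSplitFF rest with
        | nil => exact absurd hfr hne
        | cons hh tt =>
          simp [pvSplitFF, hc, hfr, List.modifyHead]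

theorem splitOn_eq_pvSplitFF (cs : List Char) :
    PySem.Chars.splitOn cs ['\x0c'] = pvSplitFF cs := by
  unfold PySem.Chars.splitOn
  rw [splitOn_go_eq (cs.length + 1) cs [] [] (Nat.lt_succ_self _)]
  cases hfr : pvSplitFF cs with
  | nil => exact absurd hfr (pvSplitFF_ne_nil cs)
  | cons hh tt => simp

theorem length_pvSplitFF (cs : List Char) :
    (pvSplitFF cs).length = cs.count '\x0c' + 1 := by
  induction cs with
  | nil => simp [pvSplitFF]
  | cons c r ih =>
    by_cases hc : c = '\x0c'
    · subst hc; simp [pvSplitFF, ih]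
    · have hne := pvSplitFF_ne_nil r
      simp only [pvSplitFF, hc, if_false, List.length_cons]
      cases hfr : pvSplitFF r with
      | nil => exact absurd hfr hne
      | cons hh tt =>
        rw [hfr] at ih
        simp_all

theorem pageLoopA_pvSplitFF (cs : List Char) : ∀ (ms i off fb : Int),
    pageLoopA (pvSplitFF cs) ms i off fb
      = if ms - off ≤ (cs.length : Int)
        then i + ((cs.take (max 0 (ms - off)).toNat).count '\x0c' : Int)
        else fb := by
  induction cs with
  | nil =>
    intro ms i off fb
    simp only [pvSplitFF, pageLoopA, List.length_nil]
    split_ifs with h1 h2 h2 <;> simp_all <;> omega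
  | cons c r ih =>
    intro ms i off fb
    by_cases hc : c = '\x0c'
    · subst hc
      have hs : pvSplitFF ('\x0c' :: r) = [] :: pvSplitFF r := by simp [pvSplitFF]
      rw [hs]
      simp only [pageLoopA, List.length_nil, Int.natCast_zero, add_zero]
      by_cases h1 : ms ≤ off
      · rw [if_pos h1]
        rw [if_pos (by simp only [List.length_cons]; push_cast; omega)]
        have : (max 0 (ms - off)).toNat = 0 := by omega
        simp [this]
      · rw [if_neg h1, ih]
        have ht : 1 ≤ ms - off := by omega
        have htk : (max 0 (ms - off)).toNat = (max 0 (ms - (off + 1))).toNat + 1 := by omega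
        by_cases h2 : ms - (off + 1) ≤ (r.length : Int)
        · rw [if_pos h2, if_pos (by simp only [List.length_cons] at *; push_cast; push_cast at h2; omega)]
          rw [htk, List.take_succ_cons, List.count_cons]
          simp; push_cast; ring
        · rw [if_neg h2, if_neg (by simp only [List.length_cons] at *; push_cast; push_cast at h2; omega)]
    · have hne := pvSplitFF_ne_nil r
      obtain ⟨hh, tt, hfr⟩ : ∃ hh tt, pvSplitFF r = hh :: tt := by
        cases hx : pvSplitFF r with
        | nil => exact absurd hx hne
        | cons a b => exact ⟨a, b, rfl⟩
      have step : pageLoopA (pvSplitFF (c :: r)) ms i off fb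
          = pageLoopA (pvSplitFF r) ms i (off + 1) fb := by
        simp only [pvSplitFF, hc, if_false, hfr, List.headI, List.tail_cons, pageLoopA,
          List.length_cons]
        have harith : off + ((hh.length + 1 : Nat) : Int) = (off + 1) + (hh.length : Int) := by
          push_cast; ring
        rw [harith]
      rw [step, ih]
      by_cases h2 : ms - (off + 1) ≤ (r.length : Int)
      · rw [if_pos h2, if_pos (by simp only [List.length_cons] at *; push_cast; push_cast at h2; omega)]
        congr 2
        by_cases h3 : ms - off ≤ 0
        · have e1 : (max 0 (ms - off)).toNat = 0 := by omega
          have e2 : (max 0 (ms - (off + 1))).toNat = 0 := by omega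
          simp [e1, e2]
        · have e1 : (max 0 (ms - off)).toNat = (max 0 (ms - (off + 1))).toNat + 1 := by omega
          rw [e1, List.take_succ_cons, List.count_cons]
          simp [hc]
      · rw [if_neg h2, if_neg (by simp only [List.length_cons] at *; push_cast; push_cast at h2; omega)]

-- ===== VERDICT (by name: the statement is the Claim_ definition above) =====
theorem page_of_match_py_spec : Claim_equal_page_of_match_py := by
  intro text_ff match_start _
  unfold Spec_page_of_match_py page_of_match_py page_of_match_py_alt
  rw [splitOn_eq_pvSplitFF, pageLoopA_pvSplitFF]
  set cs := text_ff.toList with hcs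
  by_cases h : match_start - 0 ≤ (cs.length : Int)
  · rw [if_pos h]
    simp
  · rw [if_neg h]
    have h1 : (max 1 ((pvSplitFF cs).length : Int)) = (cs.count '\x0c' : Int) + 1 := by
      rw [length_pvSplitFF]; push_cast; omega
    have h2 : cs.length ≤ (max 0 match_start).toNat := by omega
    rw [h1, List.take_of_length_le h2]
    ring
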